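-- pv_equiv track=rewrite | github.com/BasmalaAbuhashim/theory_of_c | task-2.py | pda
-- ===== SOURCE A (Python) =====
-- def pda(str):
--     if len(str) % 2 == 0:
--         return False
--     stack = []
--     state = "q0"
--     i = 0
--     n = len(str)
--     mid = n//2
--     while i<n:
--         ch = str[i]
--         if state == "q0":
--             if i == mid:
--                 state = "q1"
--             else:
--                 stack.append(ch)
--                 i+=1
--         elif state == "q1":
--             state = "q2"
--             i+=1
--         elif state == "q2":
--             if not stack:
--                 return False
--             topp = stack.pop()
--             if topp != ch:
--                 return False
--             i+=1
--     return len(stack) == 0 and state == "q2"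
-- ===== SOURCE B (Python) =====
-- def pda(str):
--     n = len(str)
--     if n % 2 == 0:
--         return False
--     mid = n // 2
--     return str[:mid] == str[mid+1:][::-1]
-- ===== Notes on version B (the rewrite author's own statement) =====
-- stated objective: simpler
-- what changed: Replaced the explicit q0/q1/q2 state machine with a stack by a direct slice comparison str[:mid] == str[mid+1:][::-1] after the odd-length check.
import Mathlib
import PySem

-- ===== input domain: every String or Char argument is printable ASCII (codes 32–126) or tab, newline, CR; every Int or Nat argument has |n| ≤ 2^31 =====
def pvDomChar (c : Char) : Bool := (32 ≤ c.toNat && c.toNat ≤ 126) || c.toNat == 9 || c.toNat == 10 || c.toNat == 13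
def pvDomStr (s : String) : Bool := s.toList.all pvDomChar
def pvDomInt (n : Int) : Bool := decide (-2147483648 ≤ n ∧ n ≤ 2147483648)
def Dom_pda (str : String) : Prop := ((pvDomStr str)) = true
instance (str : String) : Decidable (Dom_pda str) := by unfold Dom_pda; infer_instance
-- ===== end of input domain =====

-- B replaces A's q0/q1/q2 PDA state machine with an explicit stack by a direct slice comparison (simpler).


-- ===== PORT A =====
-- the while loop of A: guard i < n first, then dispatch on state; the stack is a
-- Python list (append/pop operate at the END); an unrecognised state never occurs
-- (the Python loop would not terminate there), ported as false.
def pdaLoop (l : List Char) (mid : Nat) (stack : List Char) (state : String) (i : Nat) : Bool :=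
  if h : i < l.length then
    let ch := l.get ⟨i, h⟩
    if state = "q0" then
      if i = mid then pdaLoop l mid stack "q1" i
      else pdaLoop l mid (stack ++ [ch]) "q0" (i + 1)
    else if state = "q1" then
      pdaLoop l mid stack "q2" (i + 1)
    else if state = "q2" then
      match stack with
      | [] => false                                    -- "if not stack: return False"
      | s₀ :: s => 
        let topp := (s₀ :: s).getLast (by simp)        -- stack.pop(): last element…
        let rest := (s₀ :: s).dropLast                 -- …removed from the stack
        if topp ≠ ch then false
        else pdaLoop l mid rest "q2" (i + 1)
    else false                                         -- unreachable in Python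
  else
    stack.isEmpty && state == "q2"
termination_by 2 * (l.length - i) + (if state = "q0" then 1 else 0)
decreasing_by
  all_goals simp_all
  all_goals omega

def pda (str : String) : Bool :=
  let l := str.toList
  if l.length % 2 = 0 then false
  else pdaLoop l (l.length / 2) [] "q0" 0

-- ===== PORT B =====
-- str[:mid] and str[mid+1:] with natural in-range bounds are take/drop; [::-1] is reverse.
def pda_alt (str : String) : Bool :=
  let l := str.toList
  let n := l.length
  if n % 2 = 0 then false
  else
    let mid := n / 2
    l.take mid == (l.drop (mid + 1)).reverse

-- ===== PRECONDITION & SPEC =====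
def Spec_pda (str : String) (out : Bool) : Prop := out = pda_alt str
instance (str : String) (out : Bool) : Decidable (Spec_pda str out) := by unfold Spec_pda; infer_instance

-- ===== CLAIM (what is proved, stated in full; the proofs are below) =====
def Claim_equal_pda : Prop := ∀ (str : String), Dom_pda str → Spec_pda str (pda str)

-- ===== LEMMAS AND PROOFS =====

-- Phase q2: the loop pops the end of the stack against successive characters;
-- it succeeds exactly when the reversed stack equals the rest of the string.
theorem pdaLoop_q2 (l : List Char) (mid : Nat) (stack : List Char) (i : Nat) :
    pdaLoop l mid stack "q2" i = (stack.reverse == l.drop i) := by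
  by_cases h : i < l.length
  · rw [pdaLoop]
    cases stack with
    | nil =>
      have hne : l.drop i ≠ [] := by
        intro hd; have := List.drop_eq_nil_iff.mp hd; omega
      simp only [h, dite_true]
      simp [hne]
    | cons s₀ s =>
      have hdecomp : (s₀ :: s) = (s₀ :: s).dropLast ++ [(s₀ :: s).getLast (by simp)] :=
        (List.dropLast_concat_getLast (by simp)).symm
      have hdrop : l.drop i = l.get ⟨i, h⟩ :: l.drop (i + 1) :=
        List.drop_eq_getElem_cons h
      simp only [h, dite_true, String.reduceEq, ite_false, ite_true]
      by_cases he : (s₀ :: s).getLast (by simp) = l.get ⟨i, h⟩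
      · have ih := pdaLoop_q2 l mid ((s₀ :: s).dropLast) (i + 1)
        simp only [he, ne_eq, not_true_eq_false, ite_false, ih]
        rw [show ((s₀ :: s).reverse) = l.get ⟨i, h⟩ :: ((s₀ :: s).dropLast).reverse from by
          conv_lhs => rw [hdecomp]
          simp [he], hdrop]
        rw [List.cons_beq_cons, beq_self_eq_true, Bool.true_and]
      · simp only [ne_eq, he, not_false_eq_true, ite_true]
        rw [show ((s₀ :: s).reverse) = (s₀ :: s).getLast (by simp) :: ((s₀ :: s).dropLast).reverse from by
          conv_lhs => rw [hdecomp]; simp, hdrop]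
        have he' : ((s₀ :: s).getLast (by simp) == l.get ⟨i, h⟩) = false :=
          beq_eq_false_iff_ne.mpr he
        rw [List.cons_beq_cons, he', Bool.false_and]
  · rw [pdaLoop]
    have hd : l.drop i = [] := List.drop_eq_nil_iff.mpr (by omega)
    simp only [h, dite_false, hd]
    cases stack <;> simp
termination_by 2 * (l.length - i)
decreasing_by omega

-- Phase q0: while i < mid push l[i]; at i = mid go q1 then (q2, mid+1).
theorem pdaLoop_q0 (l : List Char) (mid i : Nat) (hmid : mid < l.length) (hi : i ≤ mid) :
    pdaLoop l mid (l.take i) "q0" i = pdaLoop l mid (l.take mid) "q2" (mid + 1) := by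
  by_cases he : i = mid
  · subst he
    rw [pdaLoop]
    simp only [hmid, dite_true, ite_true]
    rw [pdaLoop]
    simp [hmid]
  · have h : i < l.length := by omega
    rw [pdaLoop]
    have htake : l.take i ++ [l.get ⟨i, h⟩] = l.take (i + 1) := by
      rw [List.take_add_one, List.getElem?_eq_getElem h]
      rfl
    simp only [h, dite_true, ite_true, if_neg he]
    rw [htake]
    exact pdaLoop_q0 l mid (i + 1) hmid (by omega)
termination_by mid - i
decreasing_by omega

theorem beq_reverse_comm (x y : List Char) : (x.reverse == y) = (x == y.reverse) := by
  by_cases h : x = y.reverse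
  · simp [h]
  · have h2 : x.reverse ≠ y := fun hrev => h (by rw [← hrev]; simp)
    simp [h, h2]

-- ===== VERDICT (by name: the statement is the Claim_ definition above) =====
theorem pda_spec : Claim_equal_pda := by
  intro str _
  unfold Spec_pda pda pda_alt
  set l := str.toList with hl
  by_cases hpar : l.length % 2 = 0
  · simp [hpar]
  · have hmid : l.length / 2 < l.length := by omega
    have h0 : (l.take 0) = ([] : List Char) := List.take_zero
    simp only [hpar, ite_false]
    rw [← h0, pdaLoop_q0 l (l.length / 2) 0 hmid (by omega), pdaLoop_q2,
      beq_reverse_comm]
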